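-- pv_equiv track=rewrite | github.com/ARTEAGA1811/PracticandoEjerciciosPython | semana30Agosto/gameOfLife5.py | generarMatrizFinal
-- ===== SOURCE A (Python) =====
-- def generarMatrizFinal(regVivas: dict, numFil, numCol):
--     #al final, genero la matriz analizando las celulas vivas que me quedaron.
--     nuevaMatriz = []
--     for i in range(numFil):
--         aux = ''
--         for k in range(numCol):
--             if((i,k) in regVivas):
--                 aux+='*'
--             else:
--                 aux+='-'
--         nuevaMatriz.append(aux)
--     return nuevaMatriz
-- ===== SOURCE B (Python) =====
-- def generarMatrizFinal(regVivas: dict, numFil, numCol):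
--     # Scatter: start from an all-dead grid, place '*' at each in-range live cell.
--     grid = [['-'] * numCol for _ in range(numFil)]
--     for (i, k) in regVivas:
--         if 0 <= i < numFil and 0 <= k < numCol:
--             grid[i][k] = '*'
--     return [''.join(row) for row in grid]
-- ===== Notes on version B (the rewrite author's own statement) =====
-- stated objective: faster
-- what changed: Instead of scanning every grid cell and testing dict membership, B builds an all-dead character grid once and scatters '*' only at the in-range live coordinates, then joins the rows.
import Mathlib
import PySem

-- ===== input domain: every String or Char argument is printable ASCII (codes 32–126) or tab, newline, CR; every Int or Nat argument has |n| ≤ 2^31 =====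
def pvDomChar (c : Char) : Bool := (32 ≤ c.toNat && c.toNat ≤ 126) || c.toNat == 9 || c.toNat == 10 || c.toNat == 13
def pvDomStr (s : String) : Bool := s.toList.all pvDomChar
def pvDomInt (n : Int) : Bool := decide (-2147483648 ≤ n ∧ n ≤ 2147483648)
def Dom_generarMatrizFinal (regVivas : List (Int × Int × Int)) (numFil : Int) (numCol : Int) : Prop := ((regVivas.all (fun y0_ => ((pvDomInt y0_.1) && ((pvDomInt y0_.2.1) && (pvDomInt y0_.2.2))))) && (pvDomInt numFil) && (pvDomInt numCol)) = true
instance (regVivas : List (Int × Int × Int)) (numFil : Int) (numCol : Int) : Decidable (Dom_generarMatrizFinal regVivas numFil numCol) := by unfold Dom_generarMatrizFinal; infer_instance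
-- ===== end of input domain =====

-- B builds an all-dead grid once and scatters '*' at the in-range live coordinates,
-- instead of A's per-cell membership scan (alternative decomposition; return value only).

-- ===== PORT A =====
-- Literal port of A: for each row i, build the row string char by char, appending '*'
-- when the key (i,k) is in the dict (a dict entry is a (key1, key2, value) triple).
def generarMatrizFinal (regVivas : List (Int × Int × Int)) (numFil : Int) (numCol : Int) : List String :=
  (PySem.List.pyRange 0 numFil 1).foldl (fun nuevaMatriz i =>
    nuevaMatriz ++ [(PySem.List.pyRange 0 numCol 1).foldl (fun aux k =>
      if regVivas.any (fun p => p.1 == i && p.2.1 == k) then aux ++ "*" else aux ++ "-") ""]) []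

-- ===== PORT B =====
-- grid[i][k] = '*'  (structural in-place update; a no-op out of range, but B only
-- calls it after its bound check, exactly as Source B indexes only after its guard)
def pvSetRow (row : List Char) (k : Nat) : List Char :=
  match row, k with
  | [], _ => []
  | _ :: t, 0 => '*' :: t
  | c :: t, Nat.succ k => c :: pvSetRow t k

def pvSetGrid (g : List (List Char)) (i k : Nat) : List (List Char) :=
  match g, i with
  | [], _ => []
  | r :: t, 0 => pvSetRow r k :: t
  | r :: t, Nat.succ i => r :: pvSetGrid t i k

def generarMatrizFinal_alt (regVivas : List (Int × Int × Int)) (numFil : Int) (numCol : Int) : List String :=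
  let grid0 := List.replicate numFil.toNat (List.replicate numCol.toNat '-')
  let grid := regVivas.foldl (fun g p =>
    if 0 ≤ p.1 ∧ p.1 < numFil ∧ 0 ≤ p.2.1 ∧ p.2.1 < numCol then
      pvSetGrid g p.1.toNat p.2.1.toNat
    else g) grid0
  grid.map String.ofList

-- ===== PRECONDITION & SPEC =====
def Spec_generarMatrizFinal (regVivas : List (Int × Int × Int)) (numFil : Int) (numCol : Int) (out : List String) : Prop := out = generarMatrizFinal_alt regVivas numFil numCol
instance (regVivas : List (Int × Int × Int)) (numFil : Int) (numCol : Int) (out : List String) : Decidable (Spec_generarMatrizFinal regVivas numFil numCol out) := by unfold Spec_generarMatrizFinal; infer_instance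

-- ===== CLAIM (what is proved, stated in full; the proofs are below) =====
def Claim_equal_generarMatrizFinal : Prop := ∀ (regVivas : List (Int × Int × Int)) (numFil : Int) (numCol : Int), Dom_generarMatrizFinal regVivas numFil numCol → Spec_generarMatrizFinal regVivas numFil numCol (generarMatrizFinal regVivas numFil numCol)

-- ===== LEMMAS AND PROOFS =====

-- the character A writes at cell (i,k)
def pvCell (regVivas : List (Int × Int × Int)) (i k : Int) : Char :=
  if regVivas.any (fun p => p.1 == i && p.2.1 == k) then '*' else '-'

-- the step of B's scatter fold, named for the lemmas
def pvStep (numFil numCol : Int) (g : List (List Char)) (p : Int × Int × Int) : List (List Char) :=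
  if 0 ≤ p.1 ∧ p.1 < numFil ∧ 0 ≤ p.2.1 ∧ p.2.1 < numCol then
    pvSetGrid g p.1.toNat p.2.1.toNat
  else g

def pvCellOf (g : List (List Char)) (i k : Nat) : Option Char :=
  g[i]?.bind (fun r => r[k]?)

-- the common normal form both ports are reduced to
def pvSpec (reg : List (Int × Int × Int)) (F C : Int) : List String :=
  (List.range F.toNat).map (fun iN : Nat =>
    String.ofList ((List.range C.toNat).map (fun kN : Nat => pvCell reg (iN : Int) (kN : Int))))

-- ---------- A-side characterisation ----------

theorem pvRowA (reg : List (Int × Int × Int)) (i : Int) (l : List Int) (s : List Char) :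
    l.foldl (fun aux k =>
      if reg.any (fun p => p.1 == i && p.2.1 == k) then aux ++ "*" else aux ++ "-")
      (String.ofList s)
    = String.ofList (s ++ l.map (fun k => pvCell reg i k)) := by
  induction l generalizing s with
  | nil => simp
  | cons k t ih =>
    simp only [List.foldl_cons]
    by_cases h : (reg.any fun p => p.1 == i && p.2.1 == k) = true
    · rw [if_pos h, show String.ofList s ++ "*" = String.ofList (s ++ ['*']) by simp, ih]
      simp [pvCell, h]
    · rw [if_neg h, show String.ofList s ++ "-" = String.ofList (s ++ ['-']) by simp, ih]
      simp [pvCell, h]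

theorem pvA_eq (reg : List (Int × Int × Int)) (F C : Int) :
    generarMatrizFinal reg F C = pvSpec reg F C := by
  unfold generarMatrizFinal pvSpec
  rw [PySem.List.foldl_append_singleton_eq_map]
  have hr : ∀ (b : Int), PySem.List.pyRange 0 b 1 = (List.range b.toNat).map (fun k : Nat => (k : Int)) := by
    intro b; rw [PySem.List.pyRange_one]; norm_num
  rw [hr F, hr C, List.map_map]
  refine List.map_congr_left ?_
  intro iN _
  show (List.map (fun k : Nat => (k : Int)) (List.range C.toNat)).foldl _ "" = _
  rw [show ("" : String) = String.ofList [] by simp, pvRowA]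
  simp [Function.comp_def]

-- ---------- B-side characterisation ----------

theorem pvSetGrid_length (g : List (List Char)) (i k : Nat) :
    (pvSetGrid g i k).length = g.length := by
  induction g generalizing i with
  | nil => rfl
  | cons r t ih => cases i <;> simp [pvSetGrid, ih]

theorem pvFold_length (numFil numCol : Int) (l : List (Int × Int × Int)) (g : List (List Char)) :
    (l.foldl (pvStep numFil numCol) g).length = g.length := by
  induction l generalizing g with
  | nil => rfl
  | cons p t ih =>
    simp only [List.foldl_cons, ih]
    unfold pvStep; split <;> simp [pvSetGrid_length]

theorem pvSetRow_get? (r : List Char) (k j : Nat) :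
    (pvSetRow r k)[j]? = if j = k then (r[j]?).map (fun _ => '*') else r[j]? := by
  induction r generalizing k j with
  | nil => simp [pvSetRow]
  | cons c t ih =>
    cases k with
    | zero => cases j <;> simp [pvSetRow]
    | succ k => cases j <;> simp [pvSetRow, ih]

theorem pvSetGrid_cellOf (g : List (List Char)) (i k i' k' : Nat) :
    pvCellOf (pvSetGrid g i k) i' k'
    = if i' = i ∧ k' = k then (pvCellOf g i' k').map (fun _ => '*') else pvCellOf g i' k' := by
  induction g generalizing i i' with
  | nil => simp [pvSetGrid, pvCellOf]
  | cons r t ih =>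
    cases i with
    | zero =>
      cases i' with
      | zero =>
        by_cases h : k' = k <;> simp [pvSetGrid, pvCellOf, pvSetRow_get?, h]
      | succ i' => simp [pvSetGrid, pvCellOf]
    | succ i =>
      cases i' with
      | zero => simp [pvSetGrid, pvCellOf]
      | succ i' =>
        have := ih i i'
        simp [pvSetGrid, pvCellOf] at this ⊢
        rw [this]

theorem pvFold_cellOf (numFil numCol : Int) (l : List (Int × Int × Int))
    (g : List (List Char)) (i k : Nat) :
    pvCellOf (l.foldl (pvStep numFil numCol) g) i k
    = if ∃ p ∈ l, (0 ≤ p.1 ∧ p.1 < numFil ∧ 0 ≤ p.2.1 ∧ p.2.1 < numCol) ∧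
          p.1.toNat = i ∧ p.2.1.toNat = k
      then (pvCellOf g i k).map (fun _ => '*') else pvCellOf g i k := by
  induction l generalizing g with
  | nil => simp
  | cons p t ih =>
    simp only [List.foldl_cons, ih (pvStep numFil numCol g p)]
    by_cases hg : (0 ≤ p.1 ∧ p.1 < numFil ∧ 0 ≤ p.2.1 ∧ p.2.1 < numCol)
    · by_cases hm : p.1.toNat = i ∧ p.2.1.toNat = k
      · have hcell : pvCellOf (pvStep numFil numCol g p) i k
            = (pvCellOf g i k).map (fun _ => '*') := by
          simp [pvStep, hg, pvSetGrid_cellOf, hm.1.symm, hm.2.symm]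
        rw [hcell]
        have hex : (∃ q ∈ p :: t, (0 ≤ q.1 ∧ q.1 < numFil ∧ 0 ≤ q.2.1 ∧ q.2.1 < numCol) ∧
            q.1.toNat = i ∧ q.2.1.toNat = k) := ⟨p, List.mem_cons_self .., hg, hm⟩
        rw [if_pos hex]
        split
        · cases pvCellOf g i k <;> rfl
        · rfl
      · have hcell : pvCellOf (pvStep numFil numCol g p) i k = pvCellOf g i k := by
          have : ¬ (i = p.1.toNat ∧ k = p.2.1.toNat) := by
            intro hc; exact hm ⟨hc.1.symm, hc.2.symm⟩
          simp [pvStep, hg, pvSetGrid_cellOf, this]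
        rw [hcell]
        have hhead : ¬ ((0 ≤ p.1 ∧ p.1 < numFil ∧ 0 ≤ p.2.1 ∧ p.2.1 < numCol) ∧
            p.1.toNat = i ∧ p.2.1.toNat = k) := fun h => hm h.2
        congr 1
        simp only [eq_iff_iff, List.exists_mem_cons_iff]
        exact (or_iff_right hhead).symm
    · have hcell : pvCellOf (pvStep numFil numCol g p) i k = pvCellOf g i k := by
        simp [pvStep, hg]
      rw [hcell]
      have hhead : ¬ ((0 ≤ p.1 ∧ p.1 < numFil ∧ 0 ≤ p.2.1 ∧ p.2.1 < numCol) ∧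
          p.1.toNat = i ∧ p.2.1.toNat = k) := fun h => hg h.1
      congr 1
      simp only [eq_iff_iff, List.exists_mem_cons_iff]
      exact (or_iff_right hhead).symm

-- ---------- bridging ----------

theorem pvExists_iff (reg : List (Int × Int × Int)) (F C : Int) (iN kN : Nat)
    (hi : iN < F.toNat) (hk : kN < C.toNat) :
    (∃ p ∈ reg, (0 ≤ p.1 ∧ p.1 < F ∧ 0 ≤ p.2.1 ∧ p.2.1 < C) ∧
        p.1.toNat = iN ∧ p.2.1.toNat = kN)
    ↔ reg.any (fun p => p.1 == (iN : Int) && p.2.1 == (kN : Int)) = true := by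
  rw [List.any_eq_true]
  constructor
  · rintro ⟨p, hp, ⟨h1, h2, h3, h4⟩, h5, h6⟩
    refine ⟨p, hp, ?_⟩
    simp only [Bool.and_eq_true, beq_iff_eq]
    omega
  · rintro ⟨p, hp, h⟩
    simp only [Bool.and_eq_true, beq_iff_eq] at h
    refine ⟨p, hp, ?_, ?_, ?_⟩ <;> omega

theorem pvB_eq (reg : List (Int × Int × Int)) (F C : Int) :
    generarMatrizFinal_alt reg F C = pvSpec reg F C := by
  unfold pvSpec
  unfold generarMatrizFinal_alt
  show (List.foldl (pvStep F C) (List.replicate F.toNat (List.replicate C.toNat '-')) reg).map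
      String.ofList = _
  set g0 := List.replicate F.toNat (List.replicate C.toNat '-') with hg0
  set g' := List.foldl (pvStep F C) g0 reg with hg'
  have hcell0 : ∀ i k : Nat, pvCellOf g0 i k
      = if i < F.toNat ∧ k < C.toNat then some '-' else none := by
    intro i k
    by_cases hi : i < F.toNat <;> by_cases hk : k < C.toNat <;>
      simp [pvCellOf, hg0, hi, hk]
  have hlen : g'.length = F.toNat := by
    rw [hg', pvFold_length]; simp [hg0]
  apply List.ext_getElem?
  intro i
  rw [List.getElem?_map, List.getElem?_map]
  by_cases hi : i < F.toNat
  · rw [List.getElem?_eq_getElem (by omega : i < g'.length),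
        List.getElem?_eq_getElem (by simpa using hi)]
    simp only [Option.map_some, List.getElem_range, Option.some.injEq]
    congr 1
    apply List.ext_getElem?
    intro k
    have hrowk : g'[i][k]? = pvCellOf g' i k := by
      rw [pvCellOf, List.getElem?_eq_getElem (by omega : i < g'.length)]
      rfl
    rw [hrowk, hg', pvFold_cellOf, hcell0, List.getElem?_map]
    by_cases hk : k < C.toNat
    · rw [List.getElem?_eq_getElem (by simpa using hk)]
      simp only [List.getElem_range, if_pos (And.intro hi hk), Option.map_some]
      rw [pvCell]
      by_cases hex : (∃ p ∈ reg, (0 ≤ p.1 ∧ p.1 < F ∧ 0 ≤ p.2.1 ∧ p.2.1 < C) ∧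
          p.1.toNat = i ∧ p.2.1.toNat = k)
      · rw [if_pos hex, if_pos ((pvExists_iff reg F C i k hi hk).mp hex)]
      · rw [if_neg hex, if_neg (fun h => hex ((pvExists_iff reg F C i k hi hk).mpr h))]
    · rw [List.getElem?_eq_none (by simpa using hk)]
      have : ¬ (i < F.toNat ∧ k < C.toNat) := fun h => hk h.2
      rw [if_neg this]
      split <;> rfl
  · rw [List.getElem?_eq_none (by omega : g'.length ≤ i),
        List.getElem?_eq_none (by simpa using hi)]
    rfl

-- ===== VERDICT (by name: the statement is the Claim_ definition above) =====
theorem generarMatrizFinal_spec : Claim_equal_generarMatrizFinal := by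
  intro reg F C _
  unfold Spec_generarMatrizFinal
  rw [pvA_eq, pvB_eq]
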